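-- pv_equiv track=rewrite | github.com/Simon-Krzysiak/python-learning | CodeSignal-solutions/Core/Strings Construction.py | stringsConstruction
-- ===== SOURCE A (Python) =====
-- class Hist(dict):
--     def count(self, x, count=1):
--         self[x] = self.get(x,0) + count
--         if self[x] == 0:
--             del self[x]
--
--     def contains(self, other):
--         for key in other:
--             if key not in self:
--                 return False
--             elif other[key] > self[key]:
--                 return False
--         return True
--
--     def subtract(self, other):
--         for key in other:
--             self[key] -= other[key]
--             if self[key] == 0:
--                 del self[key]
--
-- def stringsConstruction(a, b):
--     needed = Hist()
--     available = Hist()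
--     count = 0
--
--     for char in a:
--         needed.count(char,1)
--     for char in b:
--         available.count(char,1)
--
--     while available.contains(needed):
--         count += 1
--         available.subtract(needed)
--
--     return count
-- ===== SOURCE B (Python) =====
-- def stringsConstruction(a, b):
--     # Frequency tables once, then the answer is the minimum over the distinct
--     # characters of a of (available count // needed count).  O(|a|+|b|).
--     ca = {}
--     for ch in a:
--         ca[ch] = ca.get(ch, 0) + 1
--     cb = {}
--     for ch in b:
--         cb[ch] = cb.get(ch, 0) + 1
--     return min(cb.get(ch, 0) // cnt for ch, cnt in ca.items())
-- ===== Notes on version B (the rewrite author's own statement) =====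
-- stated objective: faster
-- what changed: Replaces A's repeated contains/subtract simulation of building copies one by one with two frequency tables and a closed-form answer min over distinct chars of a of count_b[c] // count_a[c].
-- outside the precondition, e.g. on stringsConstruction('', 'xyz'): A does not finish within the time limit, B raises ValueError
import Mathlib
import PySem

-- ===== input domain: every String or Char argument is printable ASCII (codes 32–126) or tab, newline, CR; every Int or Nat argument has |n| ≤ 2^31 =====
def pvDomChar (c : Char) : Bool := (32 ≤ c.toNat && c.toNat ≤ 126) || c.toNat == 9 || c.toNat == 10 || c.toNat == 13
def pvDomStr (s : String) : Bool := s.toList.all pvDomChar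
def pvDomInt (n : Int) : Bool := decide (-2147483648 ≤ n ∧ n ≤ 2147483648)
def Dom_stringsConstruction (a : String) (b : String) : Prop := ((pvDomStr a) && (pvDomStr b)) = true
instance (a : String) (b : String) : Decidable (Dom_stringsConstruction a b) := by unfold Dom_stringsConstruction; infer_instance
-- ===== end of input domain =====

-- B replaces A's copy-by-copy contains/subtract loop with frequency tables and
-- min over distinct chars of a of count_b[c] // count_a[c] (asymptotically faster).

-- ===== PORT A =====
-- Hist.count(x, 1): self[x] = self.get(x,0)+1; delete on zero
def histCount (d : PySem.Dict Char Int) (x : Char) (c : Int) : PySem.Dict Char Int :=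
  let d' := d.insert x (d.getD x 0 + c)
  if d'.getD x 0 = 0 then d'.erase x else d'

-- Hist.contains: every key of `other` present in `self` with other[key] <= self[key].
-- other[key]/self[key] are present-key lookups in Python wherever they are evaluated; getD _ 0 is exact there.
def histContains (self other : PySem.Dict Char Int) : Bool :=
  other.keys.all (fun key =>
    if !(self.contains key) then false
    else if other.getD key 0 > self.getD key 0 then false
    else true)

-- Hist.subtract: self[key] -= other[key] for each key of other; delete on zero.
-- self[key] is a present-key lookup wherever A reaches it (contains held); getD _ 0 is exact there.
def histSubtract (self other : PySem.Dict Char Int) : PySem.Dict Char Int :=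
  other.keys.foldl (fun s key =>
    let s' := s.insert key (s.getD key 0 - other.getD key 0)
    if s'.getD key 0 = 0 then s'.erase key else s') self

-- the while-loop; whenever a ≠ "" it makes at most |b| successful passes, so the
-- fuel |b|+1 only makes the recursion total and never cuts a run A completes.
def aLoop (fuel : Nat) (count : Int) (avail needed : PySem.Dict Char Int) : Int :=
  match fuel with
  | 0 => count
  | n + 1 =>
    if histContains avail needed then
      aLoop n (count + 1) (histSubtract avail needed) needed
    else count

def stringsConstruction (a : String) (b : String) : Int :=
  let needed := a.toList.foldl (fun d ch => histCount d ch 1) PySem.Dict.empty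
  let available := b.toList.foldl (fun d ch => histCount d ch 1) PySem.Dict.empty
  aLoop (b.toList.length + 1) 0 available needed

-- ===== PORT B =====
def stringsConstruction_alt (a : String) (b : String) : Int :=
  let ca := a.toList.foldl (fun d ch => d.modify ch 0 (· + 1)) PySem.Dict.empty
  let cb := b.toList.foldl (fun d ch => d.modify ch 0 (· + 1)) PySem.Dict.empty
  match PySem.List.min? (ca.items.map (fun p => PySem.Int.floordiv (cb.getD p.1 0) p.2)) (fun x => x) with
  | some v => v
  | none => 0  -- unreachable under Pre_ (a ≠ ""): Python's min raises on an empty sequence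

-- ===== PRECONDITION & SPEC =====
-- Pre_ excludes exactly a = "": there A's while-loop never terminates (contains of an
-- empty Hist is always True and subtract removes nothing), and B's min raises ValueError.
def Pre_stringsConstruction (a : String) (b : String) : Prop := a.toList ≠ []
instance (a : String) (b : String) : Decidable (Pre_stringsConstruction a b) := by
  unfold Pre_stringsConstruction; infer_instance
def pvWitness_stringsConstruction : String × String := ("ab", "babab")

def Spec_stringsConstruction (a : String) (b : String) (out : Int) : Prop := out = stringsConstruction_alt a b
instance (a : String) (b : String) (out : Int) : Decidable (Spec_stringsConstruction a b out) := by unfold Spec_stringsConstruction; infer_instance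

-- ===== CLAIM (what is proved, stated in full; the proofs are below) =====
def Claim_equal_stringsConstruction : Prop := ∀ (a : String) (b : String), Dom_stringsConstruction a b → Pre_stringsConstruction a b → Spec_stringsConstruction a b (stringsConstruction a b)

-- ===== LEMMAS AND PROOFS =====

-- option encoding of a Hist entry: absent iff the stored value is 0
def hOpt (v : Int) : Option Int := if v = 0 then none else some v

def cntL (l : List Char) (c : Char) : Int := (l.count c : Int)

def neededD (a : String) : PySem.Dict Char Int :=
  a.toList.foldl (fun d ch => histCount d ch 1) PySem.Dict.empty

def qv (a b : String) (c : Char) : Int :=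
  PySem.Int.floordiv (cntL b.toList c) (cntL a.toList c)

def InvP (a b : String) (k : Int) (av : PySem.Dict Char Int) : Prop :=
  ∀ c, c ∈ a.toList →
    av.get? c = hOpt (cntL b.toList c - k * cntL a.toList c) ∧
    0 ≤ cntL b.toList c - k * cntL a.toList c

theorem pv_hOpt_getD (v : Int) : (hOpt v).getD 0 = v := by
  unfold hOpt; split_ifs with h <;> simp [h]

theorem pv_get?_erase (d : PySem.Dict Char Int) (k c : Char) :
    (d.erase k).get? c = if c = k then none else d.get? c := by
  obtain ⟨items⟩ := d
  simp only [PySem.Dict.erase, PySem.Dict.get?, List.find?_filter]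
  by_cases h : c = k
  · subst h
    simp [List.find?_eq_none]
  · rw [if_neg h]
    congr 1
    have : (fun (a : Char × Int) => decide ((!a.1 == k) = true ∧ (a.1 == c) = true)) = (fun p => p.1 == c) := by
      funext x
      by_cases h2 : x.1 = c <;> simp [h2, h]
    rw [this]

theorem pv_build_get? (l : List Char) :
    ∀ c, (l.foldl (fun d ch => histCount d ch 1) PySem.Dict.empty).get? c = hOpt (cntL l c) := by
  induction l using List.reverseRecOn with
  | nil => intro c; simp [cntL, hOpt, PySem.Dict.get?_empty]
  | append_singleton t x ih =>
    intro c
    rw [List.foldl_append, List.foldl_cons, List.foldl_nil]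
    set D := t.foldl (fun d ch => histCount d ch 1) PySem.Dict.empty with hD
    have hgx : D.getD x 0 = cntL t x := by
      simp only [PySem.Dict.getD, ih x, pv_hOpt_getD]
    have hpos : (0:Int) ≤ cntL t x := by simp [cntL]
    unfold histCount
    rw [hgx]
    have h1 : (D.insert x (cntL t x + 1)).getD x 0 = cntL t x + 1 := by
      simp [PySem.Dict.getD, PySem.Dict.get?_insert_self]
    simp only [h1]
    rw [if_neg (by omega)]
    by_cases hc : c = x
    · subst hc
      rw [PySem.Dict.get?_insert_self]
      have h2 : cntL (t ++ [c]) c = cntL t c + 1 := by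
        simp [cntL, List.count_append]
      rw [h2, hOpt, if_neg (by omega)]
    · rw [PySem.Dict.get?_insert_of_ne _ _ hc, ih c]
      have h2 : cntL (t ++ [x]) c = cntL t c := by
        simp [cntL, List.count_append, List.count_singleton]
        exact fun h => hc h.symm
      rw [h2]

theorem pv_nodup_keys_erase {d : PySem.Dict Char Int} (k : Char) (h : d.keys.Nodup) :
    (d.erase k).keys.Nodup := by
  have hs : (d.erase k).keys.Sublist d.keys := by
    simp only [PySem.Dict.keys, PySem.Dict.erase]
    exact List.Sublist.map _ List.filter_sublist
  exact h.sublist hs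

theorem pv_build_nodup (l : List Char) :
    (l.foldl (fun d ch => histCount d ch 1) PySem.Dict.empty).keys.Nodup := by
  induction l using List.reverseRecOn with
  | nil => exact PySem.Dict.nodup_keys_empty
  | append_singleton t x ih =>
    rw [List.foldl_append, List.foldl_cons, List.foldl_nil]
    set D := t.foldl (fun d ch => histCount d ch 1) PySem.Dict.empty with hD
    show ((if (D.insert x (D.getD x 0 + 1)).getD x 0 = 0
        then (D.insert x (D.getD x 0 + 1)).erase x
        else D.insert x (D.getD x 0 + 1))).keys.Nodup
    have h1 := PySem.Dict.nodup_keys_insert D x (D.getD x 0 + 1) ih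
    split
    · exact pv_nodup_keys_erase _ h1
    · exact h1

theorem pv_hOpt_eq_none (v : Int) : hOpt v = none ↔ v = 0 := by
  unfold hOpt; split_ifs with h <;> simp [h]

theorem pv_needed_mem_keys (a : String) (c : Char) :
    c ∈ (neededD a).keys ↔ c ∈ a.toList := by
  rw [← not_iff_not, ← PySem.Dict.get?_eq_none_iff_not_mem_keys]
  unfold neededD
  rw [pv_build_get? a.toList c, pv_hOpt_eq_none]
  simp [cntL, List.count_eq_zero]

theorem pv_needed_getD (a : String) (c : Char) :
    (neededD a).getD c 0 = cntL a.toList c := by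
  show ((neededD a).get? c).getD 0 = _
  unfold neededD
  rw [pv_build_get? a.toList c, pv_hOpt_getD]

theorem pv_substep_get? (other s : PySem.Dict Char Int) (k c : Char) :
    ((fun (s : PySem.Dict Char Int) key =>
      let s' := s.insert key (s.getD key 0 - other.getD key 0)
      if s'.getD key 0 = 0 then s'.erase key else s') s k).get? c =
      if c = k then hOpt (s.getD k 0 - other.getD k 0) else s.get? c := by
  set v := s.getD k 0 - other.getD k 0 with hv
  show (if (s.insert k v).getD k 0 = 0 then (s.insert k v).erase k else s.insert k v).get? c = _
  have hg : (s.insert k v).getD k 0 = v := by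
    simp [PySem.Dict.getD, PySem.Dict.get?_insert_self]
  rw [hg]
  by_cases hz : v = 0
  · rw [if_pos hz, pv_get?_erase]
    by_cases hc : c = k
    · simp [hc, hOpt, hz]
    · rw [if_neg hc, if_neg hc, PySem.Dict.get?_insert_of_ne _ _ hc]
  · rw [if_neg hz]
    by_cases hc : c = k
    · subst hc
      rw [if_pos rfl, PySem.Dict.get?_insert_self, hOpt, if_neg hz]
    · rw [if_neg hc, PySem.Dict.get?_insert_of_ne _ _ hc]

theorem pv_subtract_get? (other : PySem.Dict Char Int) (ks : List Char) (hnd : ks.Nodup) :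
    ∀ (s : PySem.Dict Char Int) (c : Char),
    (ks.foldl (fun s key =>
      let s' := s.insert key (s.getD key 0 - other.getD key 0)
      if s'.getD key 0 = 0 then s'.erase key else s') s).get? c =
      if c ∈ ks then hOpt (s.getD c 0 - other.getD c 0) else s.get? c := by
  induction ks with
  | nil => intro s c; simp
  | cons k t ih =>
    intro s c
    rw [List.foldl_cons]
    have hnd' : t.Nodup := hnd.of_cons
    rw [ih hnd']
    by_cases hc : c = k
    · subst hc
      have hct : c ∉ t := (List.nodup_cons.mp hnd).1
      rw [if_neg hct, if_pos List.mem_cons_self, pv_substep_get?, if_pos rfl]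
    · by_cases hm : c ∈ t
      · rw [if_pos hm, if_pos (List.mem_cons_of_mem _ hm)]
        set S1 := (fun (s : PySem.Dict Char Int) key =>
          let s' := s.insert key (s.getD key 0 - other.getD key 0)
          if s'.getD key 0 = 0 then s'.erase key else s') s k with hS1
        have hsub : S1.get? c = s.get? c := by rw [hS1, pv_substep_get?, if_neg hc]
        have hgd : S1.getD c 0 = s.getD c 0 := by
          show (S1.get? c).getD 0 = (s.get? c).getD 0
          rw [hsub]
        rw [hgd]
      · rw [if_neg hm, pv_substep_get?, if_neg hc,
          if_neg (show c ∉ k :: t by simp [hc, hm])]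

theorem pv_contains_iff (a b : String) (k : Int) (av : PySem.Dict Char Int)
    (hInv : InvP a b k av) :
    histContains av (neededD a) = true ↔
      ∀ c ∈ a.toList, (k + 1) * cntL a.toList c ≤ cntL b.toList c := by
  have key_iff : ∀ c ∈ a.toList,
      ((if !(av.contains c) then false
        else if (neededD a).getD c 0 > av.getD c 0 then false else true) = true)
      ↔ (k + 1) * cntL a.toList c ≤ cntL b.toList c := by
    intro c hm
    obtain ⟨hg, hv0⟩ := hInv c hm
    have hA1 : (1:Int) ≤ cntL a.toList c := by
      have := List.count_pos_iff.mpr hm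
      simp only [cntL]
      omega
    have hgd : av.getD c 0 = cntL b.toList c - k * cntL a.toList c := by
      show (av.get? c).getD 0 = _
      rw [hg, pv_hOpt_getD]
    have hcontains : av.contains c
        = !(decide (cntL b.toList c - k * cntL a.toList c = 0)) := by
      rw [PySem.Dict.contains_eq_isSome_get?, hg]
      unfold hOpt
      split_ifs with h <;> simp [h]
    rw [pv_needed_getD, hgd]
    by_cases hz : cntL b.toList c - k * cntL a.toList c = 0
    · have hcb : av.contains c = false := by rw [hcontains]; simp [hz]
      simp only [hcb, Bool.not_false, if_true, Bool.false_eq_true, false_iff]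
      intro hcon; nlinarith
    · have hcb : av.contains c = true := by rw [hcontains]; simp [hz]
      simp only [hcb, Bool.not_true, Bool.false_eq_true, if_false]
      by_cases hgt : cntL a.toList c > cntL b.toList c - k * cntL a.toList c
      · rw [if_pos hgt]
        simp only [Bool.false_eq_true, false_iff]
        intro hle; nlinarith
      · rw [if_neg hgt]
        simp only [true_iff]
        nlinarith [not_lt.mp hgt]
  unfold histContains
  rw [List.all_eq_true]
  constructor
  · intro h c hm
    exact (key_iff c hm).mp (h c ((pv_needed_mem_keys a c).mpr hm))
  · intro h c hk
    exact (key_iff c ((pv_needed_mem_keys a c).mp hk)).mpr (h c ((pv_needed_mem_keys a c).mp hk))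

theorem pv_subtract_inv (a b : String) (k : Int) (av : PySem.Dict Char Int)
    (hInv : InvP a b k av)
    (hc : ∀ c ∈ a.toList, (k + 1) * cntL a.toList c ≤ cntL b.toList c) :
    InvP a b (k + 1) (histSubtract av (neededD a)) := by
  intro c hm
  unfold histSubtract
  rw [pv_subtract_get? (neededD a) (neededD a).keys (pv_build_nodup a.toList) av c,
    if_pos ((pv_needed_mem_keys a c).mpr hm)]
  have hgd : av.getD c 0 = cntL b.toList c - k * cntL a.toList c := by
    show (av.get? c).getD 0 = _
    rw [(hInv c hm).1, pv_hOpt_getD]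
  rw [hgd, pv_needed_getD]
  refine ⟨by congr 1; ring, ?_⟩
  have := hc c hm
  nlinarith [this]

theorem pv_loop (a b : String) (M : Int)
    (hx : ∀ k av, InvP a b k av → (histContains av (neededD a) = true ↔ k < M))
    (hs : ∀ k av, InvP a b k av → k < M → InvP a b (k + 1) (histSubtract av (neededD a))) :
    ∀ (fuel : Nat) (k : Int) (av : PySem.Dict Char Int),
      InvP a b k av → k ≤ M → M - k < (fuel : Int) →
      aLoop fuel k av (neededD a) = M := by
  intro fuel
  induction fuel with
  | zero =>
    intro k av _ hk hf
    exfalso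
    simp only [Nat.cast_zero] at hf
    omega
  | succ n ih =>
    intro k av hInv hk hf
    show (if histContains av (neededD a) then
        aLoop n (k + 1) (histSubtract av (neededD a)) (neededD a) else k) = M
    by_cases hcond : histContains av (neededD a) = true
    · rw [if_pos hcond]
      have hkM : k < M := (hx k av hInv).mp hcond
      exact ih (k + 1) _ (hs k av hInv hkM) (by omega) (by push_cast at hf ⊢; omega)
    · rw [if_neg hcond]
      have hnk : ¬ k < M := fun h => hcond ((hx k av hInv).mpr h)
      omega

-- ===== VERDICT (by name: the statement is the Claim_ definition above) =====
theorem stringsConstruction_spec : Claim_equal_stringsConstruction := by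
  unfold Claim_equal_stringsConstruction
  intro a b _ hpre
  show stringsConstruction a b = stringsConstruction_alt a b
  have hbr : ∀ (k : Int), ∀ c ∈ a.toList,
      (((k + 1) * cntL a.toList c ≤ cntL b.toList c) ↔ k + 1 ≤ qv a b c) := by
    intro k c hm
    have hA1 : (0:Int) < cntL a.toList c := by
      simp only [cntL, Int.natCast_pos]
      exact List.count_pos_iff.mpr hm
    rw [qv, PySem.Int.le_floordiv_iff_mul_le hA1]
  have halt : stringsConstruction_alt a b =
      match PySem.List.min? ((PySem.Set.ofList a.toList).map (fun c => qv a b c)) (fun x => x) with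
      | some v => v
      | none => 0 := by
    show (match PySem.List.min?
        (((a.toList.foldl (fun d ch => d.modify ch 0 (· + 1)) PySem.Dict.empty)).items.map
          (fun p => PySem.Int.floordiv
            (((b.toList.foldl (fun d ch => d.modify ch 0 (· + 1)) PySem.Dict.empty)).getD p.1 0) p.2))
        (fun x => x) with
      | some v => v
      | none => 0) = _
    rw [← PySem.Dict.counter_eq_foldl, ← PySem.Dict.counter_eq_foldl,
      PySem.Dict.items_counter, List.map_map]
    have hfun : ((fun p : Char × Int =>
        PySem.Int.floordiv ((PySem.Dict.counter b.toList).getD p.1 0) p.2) ∘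
        (fun k => (k, (a.toList.count k : Int)))) = fun c => qv a b c := by
      funext c
      simp [Function.comp, PySem.Dict.getD_counter, qv, cntL]
    rw [hfun]
  have hne : (PySem.Set.ofList a.toList).map (fun c => qv a b c) ≠ [] := by
    intro hnil
    rcases List.exists_mem_of_ne_nil _ hpre with ⟨c0, hc0⟩
    have : qv a b c0 ∈ (PySem.Set.ofList a.toList).map (fun c => qv a b c) :=
      List.mem_map_of_mem ((PySem.Set.mem_ofList a.toList c0).mpr hc0)
    rw [hnil] at this
    cases this
  obtain ⟨m, hmin⟩ : ∃ m, PySem.List.min?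
      ((PySem.Set.ofList a.toList).map (fun c => qv a b c)) (fun x => x) = some m := by
    cases h : PySem.List.min? ((PySem.Set.ofList a.toList).map (fun c => qv a b c)) (fun x => x) with
    | none => exact absurd ((PySem.List.min?_eq_none_iff _ _).mp h) hne
    | some v => exact ⟨v, rfl⟩
  have hM : stringsConstruction_alt a b = m := by rw [halt, hmin]
  have hMmem : ∃ c ∈ a.toList, m = qv a b c := by
    have := PySem.List.min?_mem hmin
    rcases List.mem_map.mp this with ⟨c, hc, hqc⟩
    exact ⟨c, (PySem.Set.mem_ofList a.toList c).mp hc, hqc.symm⟩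
  have hMle : ∀ c ∈ a.toList, m ≤ qv a b c := by
    intro c hc
    exact PySem.List.min?_isMin hmin _
      (List.mem_map_of_mem ((PySem.Set.mem_ofList a.toList c).mpr hc))
  have hx : ∀ k av, InvP a b k av → (histContains av (neededD a) = true ↔ k < m) := by
    intro k av hInv
    rw [pv_contains_iff a b k av hInv]
    constructor
    · intro h
      obtain ⟨c, hc, hqc⟩ := hMmem
      have hk1 := (hbr k c hc).mp (h c hc)
      rw [← hqc] at hk1
      omega
    · intro hk c hc
      exact (hbr k c hc).mpr (le_trans (by omega) (hMle c hc))
  have hs : ∀ k av, InvP a b k av → k < m → InvP a b (k + 1) (histSubtract av (neededD a)) := by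
    intro k av hInv hkM
    exact pv_subtract_inv a b k av hInv
      (fun c hc => (hbr k c hc).mpr (le_trans (by omega) (hMle c hc)))
  have hInv0 : InvP a b 0 (b.toList.foldl (fun d ch => histCount d ch 1) PySem.Dict.empty) := by
    intro c hm
    constructor
    · rw [pv_build_get? b.toList c]
      congr 1
      ring
    · rw [zero_mul, sub_zero]
      simp [cntL]
  have hm0 : 0 ≤ m := by
    obtain ⟨c, hc, hqc⟩ := hMmem
    have hA1 : (0:Int) < cntL a.toList c := by
      simp only [cntL, Int.natCast_pos]
      exact List.count_pos_iff.mpr hc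
    rw [hqc, qv, PySem.Int.le_floordiv_iff_mul_le hA1]
    simp [cntL]
  have hmub : m ≤ (b.toList.length : Int) := by
    obtain ⟨c, hc, hqc⟩ := hMmem
    have hA1 : (0:Int) < cntL a.toList c := by
      simp only [cntL, Int.natCast_pos]
      exact List.count_pos_iff.mpr hc
    have h1 : qv a b c ≤ cntL b.toList c := by
      rw [qv, PySem.Int.floordiv_eq_ediv_of_pos hA1]
      exact Int.ediv_le_self _ (by simp [cntL])
    have h2 : cntL b.toList c ≤ (b.toList.length : Int) := by
      simp only [cntL, Int.ofNat_le]
      exact_mod_cast List.count_le_length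
    omega
  rw [hM]
  show aLoop (b.toList.length + 1) 0
    (b.toList.foldl (fun d ch => histCount d ch 1) PySem.Dict.empty) (neededD a) = m
  exact pv_loop a b m hx hs (b.toList.length + 1) 0 _ hInv0 hm0 (by push_cast; omega)
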